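-- pv_equiv track=rewrite | github.com/kisliakovsky/chains_evolution | src/collects.py | transform_matrix_to_dict
-- ===== SOURCE A (Python) =====
-- from typing import TypeVar, List, Tuple, Dict
--
-- T = TypeVar('T')
--
-- IDX_KEY = 'idx'
--
-- COUNT_KEY = 'count'
--
-- def transform_matrix_to_dict(matrix: List[List[T]]) -> Dict[T, Dict[str, int]]:
--     items_dict = {}
--     for i, items in enumerate(matrix):
--         for item in items:
--             item_obj = items_dict.get(item, None)
--             if item_obj is not None:
--                 item_obj[COUNT_KEY] += 1
--             else:
--                 items_dict[item] = {
--                     IDX_KEY: i,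
--                     COUNT_KEY: 1
--                 }
--     return items_dict
-- ===== SOURCE B (Python) =====
-- from typing import TypeVar, List, Dict
--
-- T = TypeVar('T')
--
-- IDX_KEY = 'idx'
--
-- COUNT_KEY = 'count'
--
-- def transform_matrix_to_dict(matrix: List[List[T]]) -> Dict[T, Dict[str, int]]:
--     # pass 1: occurrence counts over the flattened matrix
--     flat = [item for row in matrix for item in row]
--     counts = {}
--     for item in flat:
--         counts[item] = counts.get(item, 0) + 1
--     # pass 2: first-seen row index per item
--     first_idx = {}
--     for i, row in enumerate(matrix):
--         for item in row:
--             first_idx.setdefault(item, i)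
--     # merge; iterating first_idx keeps A's first-seen key order
--     return {k: {IDX_KEY: v, COUNT_KEY: counts[k]} for k, v in first_idx.items()}
-- ===== Notes on version B (the rewrite author's own statement) =====
-- stated objective: idiomatic
-- what changed: Replaces the single fused dict-building pass (lookup, in-place count bump or fresh inner dict per element) by two independent table-building passes (a flat count table and a first-seen-index table via setdefault) merged afterwards in one comprehension.
import Mathlib
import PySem

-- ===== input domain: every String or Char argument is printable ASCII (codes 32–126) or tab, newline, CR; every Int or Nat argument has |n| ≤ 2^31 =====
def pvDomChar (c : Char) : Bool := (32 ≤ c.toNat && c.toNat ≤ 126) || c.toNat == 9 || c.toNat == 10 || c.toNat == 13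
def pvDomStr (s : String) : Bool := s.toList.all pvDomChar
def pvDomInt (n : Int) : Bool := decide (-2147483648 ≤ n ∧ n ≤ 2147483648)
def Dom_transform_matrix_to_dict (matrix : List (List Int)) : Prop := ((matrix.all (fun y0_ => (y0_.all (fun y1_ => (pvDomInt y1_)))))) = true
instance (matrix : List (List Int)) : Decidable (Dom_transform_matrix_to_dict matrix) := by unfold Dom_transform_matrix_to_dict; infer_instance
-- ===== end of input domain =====

-- B replaces A's fused single dict-building pass by two independent table passes (counts, first-seen index) merged in a comprehension; idiomatic, same cost.

-- ===== PORT A =====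
def transform_matrix_to_dict (matrix : List (List Int)) : List (Int × List (String × Int)) :=
  let items_dict : PySem.Dict Int (PySem.Dict String Int) :=
    (PySem.List.enumerate matrix 0).foldl
      (fun d p =>
        p.2.foldl
          (fun d item =>
            match d.get? item with
            | some obj => d.insert item (obj.insert "count" (obj.getD "count" 0 + 1))
            | none => d.insert item (PySem.Dict.mk [("idx", p.1), ("count", (1 : Int))]))
          d)
      PySem.Dict.empty
  items_dict.items.map (fun p => (p.1, p.2.items))

-- ===== PORT B =====
def transform_matrix_to_dict_alt (matrix : List (List Int)) : List (Int × List (String × Int)) :=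
  let flat := matrix.flatMap (fun row => row)
  let counts : PySem.Dict Int Int :=
    flat.foldl (fun d item => d.insert item (d.getD item 0 + 1)) PySem.Dict.empty
  let first_idx : PySem.Dict Int Int :=
    (PySem.List.enumerate matrix 0).foldl
      (fun d p => p.2.foldl (fun d item => d.setdefault item p.1) d)
      PySem.Dict.empty
  first_idx.items.map (fun q => (q.1, [("idx", q.2), ("count", counts.getD q.1 0)]))

-- ===== PRECONDITION & SPEC =====
def Spec_transform_matrix_to_dict (matrix : List (List Int)) (out : List (Int × List (String × Int))) : Prop := out = transform_matrix_to_dict_alt matrix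
instance (matrix : List (List Int)) (out : List (Int × List (String × Int))) : Decidable (Spec_transform_matrix_to_dict matrix out) := by unfold Spec_transform_matrix_to_dict; infer_instance

-- ===== CLAIM (what is proved, stated in full; the proofs are below) =====
def Claim_equal_transform_matrix_to_dict : Prop := ∀ (matrix : List (List Int)), Dom_transform_matrix_to_dict matrix → Spec_transform_matrix_to_dict matrix (transform_matrix_to_dict matrix)

-- ===== LEMMAS AND PROOFS =====

-- the element stream of the nested loops: (row index, item), in traversal order
def pvPairs (matrix : List (List Int)) : List (Int × Int) :=
  (PySem.List.enumerate matrix 0).flatMap (fun p => p.2.map (fun x => (p.1, x)))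

def pvStepA (d : PySem.Dict Int (PySem.Dict String Int)) (p : Int × Int) :
    PySem.Dict Int (PySem.Dict String Int) :=
  match d.get? p.2 with
  | some obj => d.insert p.2 (obj.insert "count" (obj.getD "count" 0 + 1))
  | none => d.insert p.2 (PySem.Dict.mk [("idx", p.1), ("count", (1 : Int))])

def pvStepS (d : PySem.Dict Int Int) (p : Int × Int) : PySem.Dict Int Int :=
  d.setdefault p.2 p.1

lemma pvFoldA_pairs (matrix : List (List Int)) :
    (PySem.List.enumerate matrix 0).foldl
      (fun d p =>
        p.2.foldl
          (fun d item =>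
            match d.get? item with
            | some obj => d.insert item (obj.insert "count" (obj.getD "count" 0 + 1))
            | none => d.insert item (PySem.Dict.mk [("idx", p.1), ("count", (1 : Int))]))
          d)
      PySem.Dict.empty
    = (pvPairs matrix).foldl pvStepA PySem.Dict.empty := by
  rw [pvPairs, List.foldl_flatMap]
  refine PySem.List.foldl_congr_mem _ _ _ _ (fun d p _ => ?_)
  rw [List.foldl_map]
  rfl

lemma pvFoldS_pairs (matrix : List (List Int)) :
    (PySem.List.enumerate matrix 0).foldl
      (fun d p => p.2.foldl (fun d item => d.setdefault item p.1) d)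
      PySem.Dict.empty
    = (pvPairs matrix).foldl pvStepS PySem.Dict.empty := by
  rw [pvPairs, List.foldl_flatMap]
  refine PySem.List.foldl_congr_mem _ _ _ _ (fun d p _ => ?_)
  rw [List.foldl_map]
  rfl

lemma pvEnumFlat (matrix : List (List Int)) (s : Int) :
    (PySem.List.enumerate matrix s).flatMap (fun p => p.2) = matrix.flatten := by
  induction matrix generalizing s with
  | nil => simp [PySem.List.enumerate_nil]
  | cons r rs ih => simp [PySem.List.enumerate_cons, ih]

lemma pvPairs_map_snd (matrix : List (List Int)) :
    (pvPairs matrix).map Prod.snd = matrix.flatMap (fun row => row) := by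
  rw [pvPairs, List.map_flatMap]
  have h : ∀ p : Int × List Int, (p.2.map fun x => ((p.1, x) : Int × Int)).map Prod.snd = p.2 := by
    intro p; rw [List.map_map]; simp
  calc ((PySem.List.enumerate matrix 0).flatMap
        fun p => (p.2.map fun x => (p.1, x)).map Prod.snd)
      = (PySem.List.enumerate matrix 0).flatMap (fun p => p.2) := by
        refine List.flatMap_congr (fun p _ => h p)
    _ = matrix.flatten := pvEnumFlat matrix 0
    _ = matrix.flatMap (fun row => row) := by simp

lemma pvContainsS (ps : List (Int × Int)) (d : PySem.Dict Int Int) (x : Int) :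
    (ps.foldl pvStepS d).contains x = (d.contains x || decide (x ∈ ps.map Prod.snd)) := by
  induction ps generalizing d with
  | nil => simp
  | cons p ps ih =>
      simp only [List.foldl_cons, ih, pvStepS, PySem.Dict.contains_setdefault, List.map_cons,
        List.mem_cons]
      by_cases h : x = p.2
      · simp [h]
      · rw [beq_eq_false_iff_ne.mpr h]
        simp [h]

lemma pvNodupS (ps : List (Int × Int)) (d : PySem.Dict Int Int) (h : d.keys.Nodup) :
    (ps.foldl pvStepS d).keys.Nodup := by
  induction ps generalizing d with
  | nil => exact h
  | cons p ps ih =>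
      refine ih _ ?_
      rw [pvStepS, PySem.Dict.keys_setdefault]
      split
      · exact h
      · next hc =>
          refine List.Nodup.append h (List.nodup_singleton _) ?_
          intro a ha hb
          simp only [List.mem_singleton] at hb
          subst hb
          rw [PySem.Dict.contains_iff_mem_keys] at hc
          exact hc ha

lemma pvGet?_mk_map (l : List (Int × Int)) (g : Int → Int → PySem.Dict String Int) (x : Int) :
    (PySem.Dict.mk (l.map (fun q => (q.1, g q.1 q.2)))).get? x = ((PySem.Dict.mk l).get? x).map (g x) := by
  induction l with
  | nil => rfl
  | cons q l ih =>
      obtain ⟨k, v⟩ := q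
      simp only [List.map_cons, PySem.Dict.get?_mk_cons]
      by_cases h : k = x
      · subst h; simp
      · rw [beq_eq_false_iff_ne.mpr h]
        simp only [Bool.false_eq_true, if_false]
        exact ih

-- the value A stores for key x after processing ps, expressed from B's two tables
def pvVal (ps : List (Int × Int)) (k i : Int) : PySem.Dict String Int :=
  PySem.Dict.mk [("idx", i), ("count", ((ps.map Prod.snd).count k : Int))]

lemma pvMain (ps : List (Int × Int)) :
    ps.foldl pvStepA PySem.Dict.empty
    = PySem.Dict.mk ((ps.foldl pvStepS PySem.Dict.empty).items.map
        (fun q => (q.1, pvVal ps q.1 q.2))) := by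
  induction ps using List.reverseRecOn with
  | nil => rfl
  | append_singleton ps p ih =>
      rw [List.foldl_append, List.foldl_append, List.foldl_cons, List.foldl_nil,
        List.foldl_cons, List.foldl_nil, ih]
      set dS := ps.foldl pvStepS PySem.Dict.empty with hdS
      have hnd : dS.keys.Nodup := pvNodupS ps _ (by simp [PySem.Dict.keys_empty])
      have hget : ∀ x, (PySem.Dict.mk (dS.items.map (fun q => (q.1, pvVal ps q.1 q.2)))).get? x
          = (dS.get? x).map (pvVal ps x) := fun x => pvGet?_mk_map dS.items _ x
      by_cases hc : dS.contains p.2 = true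
      · -- key already present: A bumps the count in place, B's setdefault is a no-op
        obtain ⟨j, hj⟩ : ∃ j, dS.get? p.2 = some j := by
          rw [PySem.Dict.contains_eq_isSome_get?] at hc
          exact Option.isSome_iff_exists.mp hc
        have hcA : (PySem.Dict.mk (dS.items.map (fun q => (q.1, pvVal ps q.1 q.2)))).contains p.2 = true := by
          rw [PySem.Dict.contains_eq_isSome_get?, hget, hj]; rfl
        rw [pvStepS, PySem.Dict.setdefault_of_contains dS _ hc]
        simp only [pvStepA, hget, hj, Option.map_some]
        apply PySem.Dict.ext
        rw [PySem.Dict.items_insert_of_contains _ _ hcA, List.map_map]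
        refine List.map_congr_left (fun q hq => ?_)
        simp only [Function.comp]
        by_cases hx : q.1 = p.2
        · have hq2 : dS.get? q.1 = some q.2 := PySem.Dict.get?_of_mem_items dS hq hnd
          rw [hx] at hq2
          have hj2 : q.2 = j := by rw [hj] at hq2; exact (Option.some_inj.mp hq2).symm
          have hval : (pvVal ps p.2 j).insert "count" ((pvVal ps p.2 j).getD "count" 0 + 1)
              = pvVal (ps ++ [p]) p.2 j := by
            apply PySem.Dict.ext
            rw [pvVal, pvVal, PySem.Dict.items_insert_of_contains _ _ (by simp)]
            simp [PySem.Dict.getD_eq_get?_getD, PySem.Dict.get?_mk_cons, List.count_append]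
          simp only [hx, beq_self_eq_true, if_pos]
          rw [hval, hj2]
        · have hb : (q.1 == p.2) = false := by simp [hx]
          simp only [hb, Bool.false_eq_true, if_false]
          have : ((ps ++ [p]).map Prod.snd).count q.1 = (ps.map Prod.snd).count q.1 := by
            simp [List.count_append, Ne.symm hx]
          rw [pvVal, pvVal, this]
      · -- fresh key: both sides append a new entry
        have hno : dS.get? p.2 = none := by
          rw [PySem.Dict.contains_eq_isSome_get?] at hc
          exact Option.not_isSome_iff_eq_none.mp (by simp [hc])
        have hcA : (PySem.Dict.mk (dS.items.map (fun q => (q.1, pvVal ps q.1 q.2)))).contains p.2 = false := by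
          rw [PySem.Dict.contains_eq_isSome_get?, hget, hno]; rfl
        have hnotmem : p.2 ∉ ps.map Prod.snd := by
          have := pvContainsS ps PySem.Dict.empty p.2
          rw [← hdS] at this
          rw [this] at hc
          simpa using hc
        rw [pvStepS, PySem.Dict.setdefault_of_not_contains dS _ (by simpa using hc)]
        simp only [pvStepA, hget, hno, Option.map_none]
        apply PySem.Dict.ext
        rw [PySem.Dict.items_insert_of_not_contains _ _ hcA,
          PySem.Dict.items_insert_of_not_contains _ _ (by simpa using hc)]
        rw [List.map_append]
        congr 1
        · refine List.map_congr_left (fun q hq => ?_)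
          have hx : q.1 ≠ p.2 := by
            intro h
            have hq2 : dS.get? q.1 = some q.2 := PySem.Dict.get?_of_mem_items dS hq hnd
            rw [h, hno] at hq2; simp at hq2
          have : ((ps ++ [p]).map Prod.snd).count q.1 = (ps.map Prod.snd).count q.1 := by
            simp [List.count_append, Ne.symm hx]
          rw [pvVal, pvVal, this]
        · simp [pvVal, List.count_append, List.count_eq_zero.mpr hnotmem]

-- ===== VERDICT (by name: the statement is the Claim_ definition above) =====
theorem transform_matrix_to_dict_spec : Claim_equal_transform_matrix_to_dict := by
  intro matrix _
  show transform_matrix_to_dict matrix = transform_matrix_to_dict_alt matrix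
  rw [transform_matrix_to_dict, transform_matrix_to_dict_alt]
  simp only [pvFoldA_pairs, pvFoldS_pairs, pvMain]
  rw [List.map_map]
  have hcount : ∀ k : Int, (matrix.flatten.foldl
      (fun d item => d.insert item (d.getD item 0 + 1)) PySem.Dict.empty).getD k 0
      = (((pvPairs matrix).map Prod.snd).count k : Int) := by
    intro k
    rw [PySem.Dict.getD_foldl_insert_add_one, pvPairs_map_snd]
    simp [List.flatMap_id']
  refine List.map_congr_left (fun q _ => ?_)
  simp [pvVal, hcount q.1]
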